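-- pv_equiv track=rewrite | github.com/toix/seqinf_detection_replication_origin | skew/findmotif.py | motif_distances
-- ===== SOURCE A (Python) =====
-- def similarity(char1, char2):
--     if char1 == char2:
--         return 1
--     return 0
--
-- def hamming_dist(seq1, seq2):
--     score = 0
--     for i in range(len(seq1)):
--         score += similarity(seq1[i], seq2[i])
--     return score
--
-- def motif_distances(seq, motif):
--     distances = []
--     for i in range(len(seq)):
--         if i+len(motif)-1 < len(seq):
--             distances.append(hamming_dist(motif, seq[i:i+len(motif)]))
--         else:
--             distances.append(hamming_dist(motif, seq[i:]+seq[:(i+len(motif))%len(seq)]))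
--     return distances
-- ===== SOURCE B (Python) =====
-- def motif_distances(seq, motif):
--     n = len(seq)
--     counts = [0] * n
--     for j, ch in enumerate(motif):
--         for i in range(n):
--             if seq[(i + j) % n] == ch:
--                 counts[i] += 1
--     return counts
-- ===== Notes on version B (the rewrite author's own statement) =====
-- stated objective: alternative
-- what changed: B replaces A's per-position window extraction (slice + concatenation + a helper scoring each window) by a transposed accumulation: one counts array, outer loop over motif positions, inner loop over sequence positions with modular indexing, so no windows are ever built. (Inputs with 0 < len(seq) < len(motif), where A raises IndexError, are excluded by Pre_.)
import Mathlib
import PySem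

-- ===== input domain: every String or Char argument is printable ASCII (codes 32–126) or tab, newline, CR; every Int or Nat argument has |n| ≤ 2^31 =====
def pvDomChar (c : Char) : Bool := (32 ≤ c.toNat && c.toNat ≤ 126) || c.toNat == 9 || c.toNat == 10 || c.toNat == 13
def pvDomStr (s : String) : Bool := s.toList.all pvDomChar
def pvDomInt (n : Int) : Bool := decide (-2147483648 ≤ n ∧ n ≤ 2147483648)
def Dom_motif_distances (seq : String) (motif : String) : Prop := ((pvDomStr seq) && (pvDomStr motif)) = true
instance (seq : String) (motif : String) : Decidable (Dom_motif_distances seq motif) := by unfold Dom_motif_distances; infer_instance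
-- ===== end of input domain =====

-- B replaces A's per-position window building by a transposed accumulation over motif positions
-- with modular indexing (objective: alternative; same O(n*m) cost, no windows built).

-- ===== PORT A =====
def similarity (char1 : Char) (char2 : Char) : Int :=
  if char1 == char2 then 1 else 0

-- seq2[i] may be out of range in Python (IndexError); that case is excluded by Pre_,
-- so the default 'a' is never consulted on admitted inputs.
def hamming_dist (seq1 : List Char) (seq2 : List Char) : Int :=
  (PySem.List.pyRange 0 seq1.length 1).foldl
    (fun score i => score + similarity (PySem.List.pyGetD seq1 i 'a') (PySem.List.pyGetD seq2 i 'a')) 0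

def motif_distances (seq : String) (motif : String) : List Int :=
  let s := seq.toList
  let mt := motif.toList
  (PySem.List.pyRange 0 s.length 1).foldl
    (fun distances i =>
      if i + mt.length - 1 < (s.length : Int) then
        distances ++ [hamming_dist mt (PySem.List.slice s (some i) (some (i + mt.length)))]
      else
        distances ++ [hamming_dist mt
          (PySem.List.slice s (some i) none ++
           PySem.List.slice s none (some (PySem.Int.mod (i + mt.length) s.length)))])
    []

-- ===== PORT B =====
def motif_distances_alt (seq : String) (motif : String) : List Int :=
  let s := seq.toList
  let n : Int := s.length
  (PySem.List.enumerate motif.toList).foldl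
    (fun counts p =>
      (PySem.List.pyRange 0 n 1).foldl
        (fun counts i =>
          if PySem.List.pyGetD s (PySem.Int.mod (i + p.1) n) 'a' == p.2 then
            PySem.List.pySetD counts i (PySem.List.pyGetD counts i 0 + 1)
          else counts)
        counts)
    (List.replicate s.length (0 : Int))

-- ===== PRECONDITION & SPEC =====
-- Pre_ excludes exactly the inputs where A raises IndexError: 0 < len(seq) < len(motif)
-- (the wrapped window seq[i:]+seq[:(i+m)%n] is then shorter than the motif).
def Pre_motif_distances (seq : String) (motif : String) : Prop :=
  motif.toList.length ≤ seq.toList.length ∨ seq.toList.length = 0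

instance (seq : String) (motif : String) : Decidable (Pre_motif_distances seq motif) := by
  unfold Pre_motif_distances; infer_instance

def pvWitness_motif_distances : String × String := ("ACGTAC", "AC")

def Spec_motif_distances (seq : String) (motif : String) (out : List Int) : Prop :=
  out = motif_distances_alt seq motif

instance (seq : String) (motif : String) (out : List Int) : Decidable (Spec_motif_distances seq motif out) := by
  unfold Spec_motif_distances; infer_instance

-- ===== CLAIM (what is proved, stated in full; the proofs are below) =====
def Claim_equal_motif_distances : Prop :=
  ∀ (seq : String) (motif : String), Dom_motif_distances seq motif →
    Pre_motif_distances seq motif →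
    Spec_motif_distances seq motif (motif_distances seq motif)

-- ===== LEMMAS AND PROOFS =====

-- the common value of both programs at position i: the per-motif-position circular match count
def mCnt (s mt : List Char) (i : Nat) : Int :=
  ((List.range mt.length).map
    (fun j => if s.getD ((i + j) % s.length) 'a' == mt.getD j 'a' then (1 : Int) else 0)).sum

-- ---- B side ----

theorem inner_length (f : Int → Bool) (l : List Int) (cs : List Int) :
    (l.foldl (fun cs i => if f i then PySem.List.pySetD cs i (PySem.List.pyGetD cs i 0 + 1) else cs) cs).length
      = cs.length := by
  induction l generalizing cs with
  | nil => rfl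
  | cons i t ih =>
      simp only [List.foldl_cons]
      rw [ih]
      split_ifs <;> simp [PySem.List.length_pySetD]

theorem inner_getD (f : Int → Bool) (n : Nat) :
    ∀ (cs : List Int) (k : Nat), n ≤ cs.length → k < cs.length →
    PySem.List.pyGetD
      ((PySem.List.pyRange 0 n 1).foldl
        (fun cs i => if f i then PySem.List.pySetD cs i (PySem.List.pyGetD cs i 0 + 1) else cs) cs)
      k 0
    = PySem.List.pyGetD cs k 0 + (if k < n ∧ f k then 1 else 0) := by
  induction n with
  | zero => intro cs k hn hk; simp
  | succ n ih =>
      intro cs k hn hk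
      have hcast : ((n : Int) + 1) = ((n + 1 : Nat) : Int) := by push_cast; ring
      have hsplit : PySem.List.pyRange 0 ((n + 1 : Nat) : Int) 1
          = PySem.List.pyRange 0 (n : Int) 1 ++ [(n : Int)] := by
        rw [← hcast, PySem.List.pyRange_one_succ_right (by positivity)]
      rw [hsplit, List.foldl_append]
      set F := (PySem.List.pyRange 0 (n : Int) 1).foldl
          (fun cs i => if f i then PySem.List.pySetD cs i (PySem.List.pyGetD cs i 0 + 1) else cs) cs with hF
      have hlen : F.length = cs.length := inner_length f _ cs
      have hIH : PySem.List.pyGetD F (k : Int) 0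
          = PySem.List.pyGetD cs (k : Int) 0 + (if k < n ∧ f k then 1 else 0) :=
        ih cs k (by omega) hk
      have hIHn : PySem.List.pyGetD F (n : Int) 0 = PySem.List.pyGetD cs (n : Int) 0 +
          (if n < n ∧ f n then 1 else 0) := ih cs n (by omega) (by omega)
      simp only [List.foldl_cons, List.foldl_nil]
      by_cases hf : f (n : Int) = true
      · rw [if_pos hf, PySem.List.pyGetD_pySetD_natCast F n k _ 0 (by omega)]
        by_cases hkn : k = n
        · subst hkn
          rw [if_pos rfl, hIHn]
          simp [hf]
        · rw [if_neg hkn, hIH]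
          have hite : (if k < n + 1 ∧ f ↑k = true then (1 : Int) else 0)
              = (if k < n ∧ f ↑k = true then 1 else 0) := by
            by_cases hfk : f (k : Int) = true
            · simp only [hfk, and_true]; split_ifs <;> omega
            · simp [hfk]
          rw [hite]
      · rw [if_neg hf, hIH]
        by_cases hkn : k = n
        · subst hkn
          simp [hf]
        · have hite : (if k < n + 1 ∧ f ↑k = true then (1 : Int) else 0)
              = (if k < n ∧ f ↑k = true then 1 else 0) := by
            by_cases hfk : f (k : Int) = true
            · simp only [hfk, and_true]; split_ifs <;> omega
            · simp [hfk]
          rw [hite]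

theorem outer_length (s : List Char) (n : Int) (ps : List (Int × Char)) (cs : List Int) :
    (ps.foldl
      (fun counts p =>
        (PySem.List.pyRange 0 n 1).foldl
          (fun counts i =>
            if PySem.List.pyGetD s (PySem.Int.mod (i + p.1) n) 'a' == p.2 then
              PySem.List.pySetD counts i (PySem.List.pyGetD counts i 0 + 1)
            else counts)
          counts)
      cs).length = cs.length := by
  induction ps generalizing cs with
  | nil => rfl
  | cons p t ih =>
      simp only [List.foldl_cons]
      rw [ih, inner_length]

theorem outer_getD (s : List Char) (n : Nat) (ps : List (Int × Char)) (cs : List Int) (k : Nat)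
    (hn : cs.length = n) (hk : k < n) :
    PySem.List.pyGetD
      (ps.foldl
        (fun counts p =>
          (PySem.List.pyRange 0 (n : Int) 1).foldl
            (fun counts i =>
              if PySem.List.pyGetD s (PySem.Int.mod (i + p.1) (n : Int)) 'a' == p.2 then
                PySem.List.pySetD counts i (PySem.List.pyGetD counts i 0 + 1)
              else counts)
            counts)
        cs)
      k 0
    = PySem.List.pyGetD cs k 0 +
        (ps.map (fun p =>
          if PySem.List.pyGetD s (PySem.Int.mod ((k : Int) + p.1) (n : Int)) 'a' == p.2
          then (1 : Int) else 0)).sum := by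
  induction ps generalizing cs with
  | nil => simp
  | cons p t ih =>
      simp only [List.foldl_cons, List.map_cons, List.sum_cons]
      rw [ih _ (by rw [inner_length]; exact hn) ,
          inner_getD (fun i => PySem.List.pyGetD s (PySem.Int.mod (i + p.1) (n : Int)) 'a' == p.2)
            n cs k (by omega) (by omega)]
      simp [hk]
      ring

-- B's k-th entry is mCnt
theorem alt_getD (seq motif : String) (k : Nat) (hk : k < seq.toList.length) :
    PySem.List.pyGetD (motif_distances_alt seq motif) (k : Int) 0 = mCnt seq.toList motif.toList k := by
  unfold motif_distances_alt mCnt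
  simp only []
  rw [outer_getD seq.toList seq.toList.length _ _ k (by simp) hk]
  simp only [PySem.List.pyGetD_natCast]
  rw [PySem.List.enumerate_eq_map_pyRange motif.toList 'a', List.map_map,
      PySem.List.pyRange_one, List.map_map]
  have hrepl : (List.replicate seq.toList.length (0 : Int)).getD k 0 = 0 := by
    simp [List.getD, List.getElem?_replicate]
    split <;> rfl
  rw [hrepl, zero_add]
  have hlen2 : (PySem.List.len motif.toList - 0).toNat = motif.toList.length := by
    simp [PySem.List.len]
  rw [hlen2]
  apply congrArg
  apply List.map_congr_left
  intro j hj
  simp only [Function.comp_apply, zero_add]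
  rw [(by push_cast; ring : ((k : Int) + (j : Int)) = (((k + j : Nat)) : Int)),
      PySem.Int.mod_natCast, PySem.List.pyGetD_natCast, PySem.List.pyGetD_natCast]

theorem alt_length (seq motif : String) :
    (motif_distances_alt seq motif).length = seq.toList.length := by
  unfold motif_distances_alt
  rw [outer_length]
  simp

-- ---- A side ----

theorem hamming_eq_sum (mt w : List Char) :
    hamming_dist mt w
      = ((List.range mt.length).map
          (fun j => if mt.getD j 'a' == w.getD j 'a' then (1 : Int) else 0)).sum := by
  unfold hamming_dist
  rw [PySem.List.pyRange_one, List.foldl_map, PySem.List.foldl_add]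
  rw [(by simp : (((mt.length : Int)) - 0).toNat = mt.length), zero_add]
  apply congrArg
  apply List.map_congr_left
  intro j hj
  simp [similarity, PySem.List.pyGetD_natCast]

-- the two windows agree elementwise with circular indexing
theorem window1_getD (s : List Char) (i m j : Nat) (hj : j < m) (him : i + m ≤ s.length) :
    ((s.drop i).take m).getD j 'a' = s.getD ((i + j) % s.length) 'a' := by
  have h1 : i + j < s.length := by omega
  rw [Nat.mod_eq_of_lt h1]
  simp [List.getD, hj, List.getElem?_drop]

theorem window2_getD (s : List Char) (i m j : Nat) (hj : j < m) (hi : i < s.length)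
    (hm : m ≤ s.length) (hwrap : s.length < i + m) :
    (s.drop i ++ s.take (i + m - s.length)).getD j 'a' = s.getD ((i + j) % s.length) 'a' := by
  have hlen : (s.drop i).length = s.length - i := by simp
  by_cases hcase : j < s.length - i
  · have h1 : i + j < s.length := by omega
    rw [Nat.mod_eq_of_lt h1]
    simp only [List.getD]
    rw [List.getElem?_append_left (by omega)]
    simp [List.getElem?_drop]
  · have h2 : s.length ≤ i + j := by omega
    have h3 : i + j - s.length < s.length := by omega
    have hmod : (i + j) % s.length = i + j - s.length := by
      rw [Nat.mod_eq_sub_mod h2, Nat.mod_eq_of_lt h3]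
    rw [hmod]
    simp only [List.getD]
    rw [List.getElem?_append_right (by omega)]
    have hidx : j - (s.drop i).length = i + j - s.length := by omega
    rw [hidx]
    simp [(by omega : i + j - s.length < i + m - s.length)]

theorem foldl_append_ite {A B : Type} (p : A → Prop) [DecidablePred p] (f g : A → B)
    (l : List A) (acc : List B) :
    l.foldl (fun acc x => if p x then acc ++ [f x] else acc ++ [g x]) acc
      = acc ++ l.map (fun x => if p x then f x else g x) := by
  induction l generalizing acc with
  | nil => simp
  | cons x t ih =>
      simp only [List.foldl_cons, List.map_cons]
      rw [ih]
      split_ifs <;> simp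

theorem beq_swap (a b : Char) : (a == b) = (b == a) := by
  by_cases h : a = b
  · subst h; rfl
  · rw [beq_false_of_ne h, beq_false_of_ne (Ne.symm h)]

-- A's i-th element is mCnt
theorem a_elem (seq motif : String) (i : Nat) (hi : i < seq.toList.length)
    (hpre : motif.toList.length ≤ seq.toList.length) :
    (if (i : Int) + motif.toList.length - 1 < (seq.toList.length : Int) then
        hamming_dist motif.toList (PySem.List.slice seq.toList (some (i : Int)) (some ((i : Int) + motif.toList.length)))
      else
        hamming_dist motif.toList
          (PySem.List.slice seq.toList (some (i : Int)) none ++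
           PySem.List.slice seq.toList none (some (PySem.Int.mod ((i : Int) + motif.toList.length) seq.toList.length))))
      = mCnt seq.toList motif.toList i := by
  set s := seq.toList with hs
  set mt := motif.toList with hmt
  by_cases hcase : i + mt.length ≤ s.length
  · rw [if_pos (by push_cast; omega)]
    rw [(by push_cast; ring : (i : Int) + (mt.length : Int) = ((i + mt.length : Nat) : Int))]
    rw [(by push_cast; ring : ((i + mt.length : Nat) : Int) = (i : Int) + (mt.length : Int))]
    rw [PySem.List.slice_natCast_add s i mt.length, hamming_eq_sum]
    unfold mCnt
    apply congrArg
    apply List.map_congr_left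
    intro j hj
    rw [window1_getD s i mt.length j (List.mem_range.mp hj) hcase, beq_swap]
  · rw [if_neg (by push_cast; omega)]
    have hmodeq : PySem.Int.mod ((i : Int) + mt.length) s.length
        = ((i + mt.length - s.length : Nat) : Int) := by
      rw [(by push_cast; ring : (i : Int) + (mt.length : Int) = ((i + mt.length : Nat) : Int)),
          PySem.Int.mod_natCast]
      congr 1
      have h2 : i + mt.length - s.length < s.length := by omega
      rw [Nat.mod_eq_sub_mod (by omega), Nat.mod_eq_of_lt h2]
    rw [hmodeq, PySem.List.slice_from_natCast, PySem.List.slice_to_natCast, hamming_eq_sum]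
    unfold mCnt
    apply congrArg
    apply List.map_congr_left
    intro j hj
    rw [window2_getD s i mt.length j (List.mem_range.mp hj) hi hpre (by omega), beq_swap]

-- ===== VERDICT (by name: the statement is the Claim_ definition above) =====
theorem motif_distances_spec : Claim_equal_motif_distances := by
  intro seq motif _ hpre
  unfold Spec_motif_distances
  rcases hpre with hpre | hzero
  case inr =>
    -- empty sequence: both programs return []
    have hB : (motif_distances_alt seq motif).length = 0 := by rw [alt_length, hzero]
    have hA : motif_distances seq motif = [] := by
      unfold motif_distances
      dsimp only
      simp [hzero]
    rw [hA, List.eq_nil_of_length_eq_zero hB]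
  case inl =>
    apply List.ext_getElem?
    intro k
    have hAform : motif_distances seq motif
        = (List.range seq.toList.length).map (fun i => mCnt seq.toList motif.toList i) := by
      unfold motif_distances
      dsimp only
      rw [foldl_append_ite, List.nil_append, PySem.List.pyRange_one, List.map_map]
      rw [(by simp : (((seq.toList.length : Int)) - 0).toNat = seq.toList.length)]
      apply List.map_congr_left
      intro i hi
      simp only [Function.comp_apply, zero_add]
      exact a_elem seq motif i (List.mem_range.mp hi) hpre
    by_cases hk : k < seq.toList.length
    · have hBlen : k < (motif_distances_alt seq motif).length := by rw [alt_length]; exact hk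
      have hgd := alt_getD seq motif k hk
      rw [PySem.List.pyGetD_natCast] at hgd
      have hBk : (motif_distances_alt seq motif)[k] = mCnt seq.toList motif.toList k := by
        rw [← hgd]
        simp [List.getD, List.getElem?_eq_getElem hBlen]
      rw [hAform, List.getElem?_map, List.getElem?_range hk, List.getElem?_eq_getElem hBlen]
      simp [hBk]
    · rw [List.getElem?_eq_none (by rw [hAform, List.length_map, List.length_range]; omega),
          List.getElem?_eq_none (by rw [alt_length]; omega)]
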